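-- pv_equiv track=rewrite | github.com/omegaup/omegaup | stuff/ai_editorial_worker/website_uploader.py | prepare_editorial_for_upload
-- ===== SOURCE A (Python) =====
-- def prepare_editorial_for_upload(content: str) -> str:
--     """Prepare editorial content for website upload."""
--     # Clean up content
--     cleaned_content = content.strip()
--
--     # Normalize line endings
--     cleaned_content = cleaned_content.replace(
--         '\r\n', '\n').replace('\r', '\n')
--
--     # Remove excessive blank lines
--     lines = cleaned_content.split('\n')
--     cleaned_lines = []
--     blank_line_count = 0
--
--     for line in lines:
--         if line.strip() == '':
--             blank_line_count += 1
--             # Allow max 2 consecutive blank lines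
--             if blank_line_count <= 2:
--                 cleaned_lines.append(line)
--         else:
--             blank_line_count = 0
--             cleaned_lines.append(line)
--
--     cleaned_content = '\n'.join(cleaned_lines)
--
--     # Ensure content ends with newline
--     if not cleaned_content.endswith('\n'):
--         cleaned_content += '\n'
--
--     return cleaned_content
-- ===== SOURCE B (Python) =====
-- def prepare_editorial_for_upload(content: str) -> str:
--     """Prepare editorial content for website upload."""
--     text = content.strip().replace('\r\n', '\n').replace('\r', '\n')
--     lines = text.split('\n')
--     blanks = [ln.strip() == '' for ln in lines]
--     kept = [ln for ln, b0, b1, b2 in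
--             zip(lines, blanks, [False] + blanks, [False, False] + blanks)
--             if not (b0 and b1 and b2)]
--     out = '\n'.join(kept)
--     return out if out.endswith('\n') else out + '\n'
-- ===== Notes on version B (the rewrite author's own statement) =====
-- stated objective: alternative
-- what changed: Replaced A's stateful per-line blank counter by a stateless table-plus-zip formulation: precompute a blankness list, then keep each line unless it and its two predecessors are all blank, via a comprehension over a 4-way zip with two shifted copies of the table.
import Mathlib
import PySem

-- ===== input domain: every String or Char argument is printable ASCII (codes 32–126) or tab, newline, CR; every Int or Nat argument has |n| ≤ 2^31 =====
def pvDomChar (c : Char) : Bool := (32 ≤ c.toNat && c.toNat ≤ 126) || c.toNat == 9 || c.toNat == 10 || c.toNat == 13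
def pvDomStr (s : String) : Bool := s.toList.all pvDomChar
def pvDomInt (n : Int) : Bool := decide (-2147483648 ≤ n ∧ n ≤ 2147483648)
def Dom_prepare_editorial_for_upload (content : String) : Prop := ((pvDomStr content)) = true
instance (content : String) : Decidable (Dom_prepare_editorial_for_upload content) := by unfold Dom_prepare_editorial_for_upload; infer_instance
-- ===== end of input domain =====

-- B replaces A's stateful blank-counter loop by a stateless zip/filter: a line is kept
-- iff it is non-blank or the two original lines before it are not both blank (alternative decomposition, same cost).

-- ===== PORT A =====
-- A's for-loop over lines, carrying (cleaned_lines, blank_line_count) exactly as the Python does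
def pvALoop : List (List Char) → List (List Char) → Nat → List (List Char)
  | [], acc, _ => acc
  | l :: rest, acc, cnt =>
      if PySem.Chars.strip l = [] then
        pvALoop rest (if cnt + 1 ≤ 2 then acc ++ [l] else acc) (cnt + 1)
      else
        pvALoop rest (acc ++ [l]) 0

def prepare_editorial_for_upload (content : String) : String :=
  let c0 := PySem.Chars.strip content.toList
  let c1 := PySem.Chars.replace (PySem.Chars.replace c0 ['\r', '\n'] ['\n']) ['\r'] ['\n']
  let lines := PySem.Chars.splitOn c1 ['\n']
  let joined := PySem.Chars.join ['\n'] (pvALoop lines [] 0)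
  String.ofList (if PySem.Chars.endswith joined ['\n'] then joined else joined ++ ['\n'])

-- ===== PORT B =====
-- Source B's blankness table and the 4-way zip comprehension (p1, p2 seed the two shifted columns)
def pvBlank (l : List Char) : Bool := decide (PySem.Chars.strip l = [])

def pvBZip (lines : List (List Char)) (p1 p2 : Bool) : List (List Char) :=
  let bs := lines.map pvBlank
  (lines.zip (bs.zip ((p1 :: bs).zip (p2 :: p1 :: bs)))).filterMap
    (fun x => if x.2.1 && x.2.2.1 && x.2.2.2 then none else some x.1)

def prepare_editorial_for_upload_alt (content : String) : String :=
  let text := PySem.Chars.replace (PySem.Chars.replace (PySem.Chars.strip content.toList)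
      ['\r', '\n'] ['\n']) ['\r'] ['\n']
  let kept := pvBZip (PySem.Chars.splitOn text ['\n']) false false
  let out := PySem.Chars.join ['\n'] kept
  String.ofList (if PySem.Chars.endswith out ['\n'] then out else out ++ ['\n'])

-- ===== PRECONDITION & SPEC =====
def Spec_prepare_editorial_for_upload (content : String) (out : String) : Prop := out = prepare_editorial_for_upload_alt content
instance (content : String) (out : String) : Decidable (Spec_prepare_editorial_for_upload content out) := by unfold Spec_prepare_editorial_for_upload; infer_instance

-- ===== CLAIM (what is proved, stated in full; the proofs are below) =====
def Claim_equal_prepare_editorial_for_upload : Prop := ∀ (content : String), Dom_prepare_editorial_for_upload content → Spec_prepare_editorial_for_upload content (prepare_editorial_for_upload content)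

-- ===== LEMMAS AND PROOFS =====

theorem pvBZip_nil (p1 p2 : Bool) : pvBZip [] p1 p2 = [] := by
  simp [pvBZip]

theorem pvBZip_cons (l : List Char) (rest : List (List Char)) (p1 p2 : Bool) :
    pvBZip (l :: rest) p1 p2 =
      (if pvBlank l && p1 && p2 then [] else [l]) ++ pvBZip rest (pvBlank l) p1 := by
  simp only [pvBZip, List.map_cons, List.zip_cons_cons, List.filterMap_cons]
  split_ifs <;> simp

-- A's loop state cnt corresponds to the two shifted blank columns via
-- p1 = (1 ≤ cnt) and p1 && p2 = (2 ≤ cnt)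
theorem pvALoop_eq_pvBZip : ∀ (lines acc : List (List Char)) (cnt : Nat) (p1 p2 : Bool),
    p1 = decide (1 ≤ cnt) → (p1 && p2) = decide (2 ≤ cnt) →
    pvALoop lines acc cnt = acc ++ pvBZip lines p1 p2 := by
  intro lines
  induction lines with
  | nil => intro acc cnt p1 p2 _ _; simp [pvALoop, pvBZip_nil]
  | cons l rest ih =>
    intro acc cnt p1 p2 h1 h2
    by_cases hb : PySem.Chars.strip l = []
    · have hbl : pvBlank l = true := by simp [pvBlank, hb]
      rw [pvBZip_cons, hbl]
      rw [pvALoop, if_pos hb]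
      rw [ih _ (cnt + 1) true p1 (by simp) (by rw [Bool.true_and, h1]; simp)]
      by_cases h2c : cnt + 1 ≤ 2
      · have : (p1 && p2) = false := by rw [h2]; simp; omega
        simp [this, h2c]
      · have : (p1 && p2) = true := by rw [h2]; simp; omega
        simp [this, h2c]
    · have hbl : pvBlank l = false := by simp [pvBlank, hb]
      rw [pvBZip_cons, hbl]
      rw [pvALoop, if_neg hb]
      rw [ih _ 0 (pvBlank l) p1 (by simp [hbl]) (by simp [hbl])]
      simp [hbl]

-- ===== VERDICT (by name: the statement is the Claim_ definition above) =====
theorem prepare_editorial_for_upload_spec : Claim_equal_prepare_editorial_for_upload := by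
  intro content _
  unfold Spec_prepare_editorial_for_upload
  have h := pvALoop_eq_pvBZip (PySem.Chars.splitOn (PySem.Chars.replace
      (PySem.Chars.replace (PySem.Chars.strip content.toList) ['\r', '\n'] ['\n'])
      ['\r'] ['\n']) ['\n']) [] 0 false false (by simp) (by simp)
  simp only [List.nil_append] at h
  simp only [prepare_editorial_for_upload, prepare_editorial_for_upload_alt, h]
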